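-- pv_equiv track=rewrite | github.com/ericka-cespedes/IntroProgrammingPY | Practica8.py | es_vector_columna
-- ===== SOURCE A (Python) =====
-- def es_vector_columna(vector, i):
--     if vector==[]:
--         if i>1:
--             return True
--         else:
--             return False
--     else:
--         return es_vector_columna(vector[1:], i+1)
-- ===== SOURCE B (Python) =====
-- def es_vector_columna(vector, i):
--     acc = i
--     for _ in vector:
--         acc += 1
--     return acc > 1
-- ===== Notes on version B (the rewrite author's own statement) =====
-- stated objective: simpler
-- what changed: Replaces A's recursion over repeatedly sliced tails with a single iterative loop that increments an accumulator starting at i, then compares once.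
import Mathlib
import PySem

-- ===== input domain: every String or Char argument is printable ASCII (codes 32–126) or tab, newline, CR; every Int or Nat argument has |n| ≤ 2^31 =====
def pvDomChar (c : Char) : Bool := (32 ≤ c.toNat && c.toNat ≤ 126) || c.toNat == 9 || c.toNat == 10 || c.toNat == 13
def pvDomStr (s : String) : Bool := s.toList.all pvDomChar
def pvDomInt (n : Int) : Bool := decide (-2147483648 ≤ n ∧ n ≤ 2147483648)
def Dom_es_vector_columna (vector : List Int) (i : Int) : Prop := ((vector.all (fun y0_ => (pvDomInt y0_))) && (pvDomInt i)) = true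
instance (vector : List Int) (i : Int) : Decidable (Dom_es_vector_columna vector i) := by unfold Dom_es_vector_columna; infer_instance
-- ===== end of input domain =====

-- B replaces A's tail-slicing recursion with one iterative accumulator loop; objective: simpler.

-- ===== PORT A =====
def es_vector_columna (vector : List Int) (i : Int) : Bool :=
  match vector with
  | [] => if i > 1 then true else false
  | _ :: rest => es_vector_columna rest (i + 1)

-- ===== PORT B =====
def es_vector_columna_alt (vector : List Int) (i : Int) : Bool :=
  let acc := vector.foldl (fun a _ => a + 1) i
  decide (acc > 1)

-- ===== PRECONDITION & SPEC =====
def Spec_es_vector_columna (vector : List Int) (i : Int) (out : Bool) : Prop := out = es_vector_columna_alt vector i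
instance (vector : List Int) (i : Int) (out : Bool) : Decidable (Spec_es_vector_columna vector i out) := by unfold Spec_es_vector_columna; infer_instance

-- ===== CLAIM (what is proved, stated in full; the proofs are below) =====
def Claim_equal_es_vector_columna : Prop := ∀ (vector : List Int) (i : Int), Dom_es_vector_columna vector i → Spec_es_vector_columna vector i (es_vector_columna vector i)

-- ===== LEMMAS AND PROOFS =====
theorem es_vector_columna_eq (vector : List Int) (i : Int) :
    es_vector_columna vector i = es_vector_columna_alt vector i := by
  induction vector generalizing i with
  | nil =>
    simp [es_vector_columna, es_vector_columna_alt]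
  | cons x rest ih =>
    simp [es_vector_columna, es_vector_columna_alt, List.foldl] at *
    exact ih (i + 1)

-- ===== VERDICT (by name: the statement is the Claim_ definition above) =====
theorem es_vector_columna_spec : Claim_equal_es_vector_columna := by
  intro vector i _
  exact es_vector_columna_eq vector i
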